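-- pv_equiv track=rewrite | github.com/paw309/Hamiltonian-Knights | trap_sim_v1.py | build_knight_adjacency
-- ===== SOURCE A (Python) =====
-- def build_knight_adjacency(n=8):
--     deltas = [(2,1),(1,2),(-1,2),(-2,1),(-2,-1),(-1,-2),(1,-2),(2,-1)]
--     adj = {}
--     for r in range(n):
--         for c in range(n):
--             nbrs = {
--                 (r+dr, c+dc)
--                 for dr, dc in deltas
--                 if 0 <= r+dr < n and 0 <= c+dc < n
--             }
--             adj[(r, c)] = nbrs
--     return adj
-- ===== SOURCE B (Python) =====
-- def build_knight_adjacency(n=8):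
--     deltas = [(2,1),(1,2),(-1,2),(-2,1),(-2,-1),(-1,-2),(1,-2),(2,-1)]
--     adj = {(r, c): set() for r in range(n) for c in range(n)}
--     for dr, dc in deltas:
--         for r in range(max(0, -dr), min(n, n - dr)):
--             for c in range(max(0, -dc), min(n, n - dc)):
--                 adj[(r, c)].add((r + dr, c + dc))
--     return adj
-- ===== Notes on version B (the rewrite author's own statement) =====
-- stated objective: alternative
-- what changed: B inverts the loop nest: it pre-seeds every cell with an empty set, then iterates delta-major, computing for each knight delta the closed-form rectangle of source cells (no per-cell bounds test) and adding the shifted target to each cell's set incrementally, instead of A's cell-major construction of each neighbour set from scratch with a filtered comprehension over all 8 deltas.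
import Mathlib
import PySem

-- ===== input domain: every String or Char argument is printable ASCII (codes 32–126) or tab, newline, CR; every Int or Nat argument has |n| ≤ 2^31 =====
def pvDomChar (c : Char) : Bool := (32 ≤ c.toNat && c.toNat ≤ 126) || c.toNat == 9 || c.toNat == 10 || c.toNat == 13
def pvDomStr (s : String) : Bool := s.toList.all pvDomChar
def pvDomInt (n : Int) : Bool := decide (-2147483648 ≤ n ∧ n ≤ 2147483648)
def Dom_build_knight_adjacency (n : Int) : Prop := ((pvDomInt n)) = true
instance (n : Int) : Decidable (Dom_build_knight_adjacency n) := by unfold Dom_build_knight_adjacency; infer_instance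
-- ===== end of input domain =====

-- B re-implements A delta-major: pre-seed every cell with an empty set, then for each knight delta
-- add the shifted target over the closed-form in-bounds rectangle (no per-cell bounds test); same values.

-- ===== PORT A =====
-- the shared literal list of the 8 knight deltas (Python: deltas = [...])
def kDeltas : List (Int × Int) := [(2,1),(1,2),(-1,2),(-2,1),(-2,-1),(-1,-2),(1,-2),(2,-1)]

-- literal port of A: row-major cell loop, each cell's neighbour set built by a set
-- comprehension over all 8 deltas with an in-bounds test (PySem.Set.ofList of the generated list);
-- the trailing .map flattens dict[(r,c)] = set  into the (Int × Int × List (Int × Int)) convention.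
def build_knight_adjacency (n : Int) : List (Int × Int × List (Int × Int)) :=
  let adj : PySem.Dict (Int × Int) (PySem.Set (Int × Int)) :=
    (PySem.List.pyRange 0 n 1).foldl (fun adj r =>
      (PySem.List.pyRange 0 n 1).foldl (fun adj c =>
        adj.insert (r, c)
          (PySem.Set.ofList ((kDeltas.filter (fun d =>
            decide (0 ≤ r + d.1 ∧ r + d.1 < n ∧ 0 ≤ c + d.2 ∧ c + d.2 < n))).map
              (fun d => (r + d.1, c + d.2))))) adj)
      PySem.Dict.empty
  adj.items.map (fun p => (p.1.1, p.1.2, p.2))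

-- ===== PORT B =====
-- literal port of B (Source B): seed {(r,c): set()} row-major, then delta-major incremental edge
-- insertion over the closed-form rectangle ranges; adj[(r,c)].add(t) is Dict.modify at an
-- always-present key (exact: the rectangle ranges lie inside the seeded key set).
def build_knight_adjacency_alt (n : Int) : List (Int × Int × List (Int × Int)) :=
  let seeded : PySem.Dict (Int × Int) (PySem.Set (Int × Int)) :=
    (PySem.List.pyRange 0 n 1).foldl (fun adj r =>
      (PySem.List.pyRange 0 n 1).foldl (fun adj c =>
        adj.insert (r, c) PySem.Set.empty) adj) PySem.Dict.empty
  let adj := kDeltas.foldl (fun adj d =>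
    (PySem.List.pyRange (max 0 (-d.1)) (min n (n - d.1)) 1).foldl (fun adj r =>
      (PySem.List.pyRange (max 0 (-d.2)) (min n (n - d.2)) 1).foldl (fun adj c =>
        adj.modify (r, c) PySem.Set.empty
          (fun s => PySem.Set.add s (r + d.1, c + d.2))) adj) adj) seeded
  adj.items.map (fun p => (p.1.1, p.1.2, p.2))

-- ===== PRECONDITION & SPEC =====
def Spec_build_knight_adjacency (n : Int) (out : List (Int × Int × List (Int × Int))) : Prop := out = build_knight_adjacency_alt n
instance (n : Int) (out : List (Int × Int × List (Int × Int))) : Decidable (Spec_build_knight_adjacency n out) := by unfold Spec_build_knight_adjacency; infer_instance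

-- ===== CLAIM (what is proved, stated in full; the proofs are below) =====
def Claim_equal_build_knight_adjacency : Prop := ∀ (n : Int), Dom_build_knight_adjacency n → Spec_build_knight_adjacency n (build_knight_adjacency n)

-- ===== LEMMAS AND PROOFS =====

-- board cells in row-major order
def pvCells (n : Int) : List (Int × Int) :=
  (PySem.List.pyRange 0 n 1).flatMap (fun r => (PySem.List.pyRange 0 n 1).map (fun c => (r, c)))

-- B's per-delta pass, named for the proofs (definitionally the body of the fold in the port)
def knightStep (n : Int) (adj : PySem.Dict (Int × Int) (PySem.Set (Int × Int))) (d : Int × Int) :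
    PySem.Dict (Int × Int) (PySem.Set (Int × Int)) :=
  (PySem.List.pyRange (max 0 (-d.1)) (min n (n - d.1)) 1).foldl (fun adj r =>
    (PySem.List.pyRange (max 0 (-d.2)) (min n (n - d.2)) 1).foldl (fun adj c =>
      adj.modify (r, c) PySem.Set.empty
        (fun s => PySem.Set.add s (r + d.1, c + d.2))) adj) adj

lemma pvCells_nodup (n : Int) : (pvCells n).Nodup := by
  have h := PySem.List.nodup_pyRange_one 0 n
  exact List.Nodup.product h h

lemma mem_pvCells {n a b : Int} : (a, b) ∈ pvCells n ↔ (0 ≤ a ∧ a < n) ∧ (0 ≤ b ∧ b < n) := by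
  show (a, b) ∈ (PySem.List.pyRange 0 n 1) ×ˢ (PySem.List.pyRange 0 n 1) ↔ _
  rw [List.mem_product]
  simp [PySem.List.mem_pyRange_one]



lemma targets_nodup (a b : Int) :
    (kDeltas.map (fun dl => (a + dl.1, b + dl.2))).Nodup := by
  simp [kDeltas, List.nodup_cons, Prod.mk.injEq]

lemma nested_insert_items {ν : Type} (cs : List Int) (V : Int → Int → ν) :
    ∀ (rs : List Int) (d : PySem.Dict (Int × Int) ν), rs.Nodup → cs.Nodup →
      (∀ r ∈ rs, ∀ c ∈ cs, (r, c) ∉ d.keys) →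
      (rs.foldl (fun adj r => cs.foldl (fun adj c => adj.insert (r, c) (V r c)) adj) d).items
        = d.items ++ rs.flatMap (fun r => cs.map (fun c => ((r, c), V r c))) := by
  intro rs
  induction rs with
  | nil => intro d _ _ _; simp
  | cons r t ih =>
    intro d hrs hcs hfresh
    simp only [List.foldl_cons, List.flatMap_cons]
    have hrow := PySem.Dict.items_foldl_insert_fresh cs (fun c => (r, c)) (fun c => V r c) d
      (fun c hc => by
        have := hfresh r (by simp) c hc
        rw [← Bool.not_eq_true, PySem.Dict.contains_iff_mem_keys]; exact this)
      (List.Nodup.map (fun c₁ c₂ h => by injection h) hcs)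
    have hkeys : (cs.foldl (fun adj c => adj.insert (r, c) (V r c)) d).keys
        = d.keys ++ cs.map (fun c => (r, c)) := by
      simp only [PySem.Dict.keys, hrow, List.map_append, List.map_map]
      rfl
    rw [ih _ hrs.of_cons hcs (by
      intro r' hr' c hc
      rw [hkeys]
      simp only [List.mem_append, List.mem_map, not_or]
      refine ⟨hfresh r' (by simp [hr']) c hc, ?_⟩
      rintro ⟨c', _, hEq⟩
      have : r = r' := (Prod.ext_iff.mp hEq).1
      exact (List.nodup_cons.mp hrs).1 (this ▸ hr'))]
    rw [hrow, List.append_assoc]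



lemma inner_modify_getD {ν : Type} (dflt : ν) (g : Int → Int → ν → ν) (r : Int) :
    ∀ (cs : List Int) (d : PySem.Dict (Int × Int) ν) (q : Int × Int), cs.Nodup →
      (cs.foldl (fun adj c => adj.modify (r, c) dflt (g r c)) d).getD q dflt
        = if q.1 = r ∧ q.2 ∈ cs then g q.1 q.2 (d.getD q dflt) else d.getD q dflt := by
  intro cs
  induction cs with
  | nil => intro d q _; simp
  | cons c t ih =>
    intro d q hcs
    simp only [List.foldl_cons]
    rw [ih _ _ hcs.of_cons, PySem.Dict.getD_modify]
    obtain ⟨q1, q2⟩ := q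
    by_cases h1 : q1 = r
    · subst h1
      by_cases h2 : q2 ∈ t
      · have hne : (q1, q2) ≠ (q1, c) := by
          intro h
          injection h with ha hb
          exact (List.nodup_cons.mp hcs).1 (hb ▸ h2)
        simp [h2, hne]
      · by_cases h3 : q2 = c
        · subst h3; simp [h2]
        · simp [h2, h3, Prod.ext_iff]
    · simp [h1, Prod.ext_iff]

lemma nested_modify_getD {ν : Type} (dflt : ν) (g : Int → Int → ν → ν) (cs : List Int) :
    ∀ (rs : List Int) (d : PySem.Dict (Int × Int) ν) (q : Int × Int), rs.Nodup → cs.Nodup →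
      (rs.foldl (fun adj r => cs.foldl (fun adj c => adj.modify (r, c) dflt (g r c)) adj) d).getD q dflt
        = if q.1 ∈ rs ∧ q.2 ∈ cs then g q.1 q.2 (d.getD q dflt) else d.getD q dflt := by
  intro rs
  induction rs with
  | nil => intro d q _ _; simp
  | cons r t ih =>
    intro d q hrs hcs
    simp only [List.foldl_cons]
    rw [ih _ _ hrs.of_cons hcs, inner_modify_getD dflt g r _ _ _ hcs]
    by_cases h1 : q.1 ∈ t
    · have hne : q.1 ≠ r := fun h => (List.nodup_cons.mp hrs).1 (h ▸ h1)
      simp [h1, hne]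
    · by_cases h2 : q.1 = r
      · simp [h2, (List.nodup_cons.mp hrs).1]
      · simp [h1, h2]

lemma inner_modify_keys {ν : Type} (dflt : ν) (g : Int → Int → ν → ν) (r : Int) :
    ∀ (cs : List Int) (d : PySem.Dict (Int × Int) ν), (∀ c ∈ cs, (r, c) ∈ d.keys) →
      (cs.foldl (fun adj c => adj.modify (r, c) dflt (g r c)) d).keys = d.keys := by
  intro cs
  induction cs with
  | nil => intro d _; rfl
  | cons c t ih =>
    intro d hmem
    simp only [List.foldl_cons]
    have hk : (d.modify (r, c) dflt (g r c)).keys = d.keys := by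
      rw [PySem.Dict.keys_modify, PySem.Dict.keys_insert_of_contains]
      exact (PySem.Dict.contains_iff_mem_keys d (r, c)).mpr (hmem c (by simp))
    rw [ih _ (fun c' hc' => hk ▸ hmem c' (by simp [hc'])), hk]

lemma nested_modify_keys {ν : Type} (dflt : ν) (g : Int → Int → ν → ν) (cs : List Int) :
    ∀ (rs : List Int) (d : PySem.Dict (Int × Int) ν), (∀ r ∈ rs, ∀ c ∈ cs, (r, c) ∈ d.keys) →
      (rs.foldl (fun adj r => cs.foldl (fun adj c => adj.modify (r, c) dflt (g r c)) adj) d).keys = d.keys := by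
  intro rs
  induction rs with
  | nil => intro d _; rfl
  | cons r t ih =>
    intro d hmem
    simp only [List.foldl_cons]
    have hk := inner_modify_keys dflt g r cs d (fun c hc => hmem r (by simp) c hc)
    rw [ih _ (fun r' hr' c hc => hk ▸ hmem r' (by simp [hr']) c hc), hk]



lemma knightStep_getD (n : Int) (dl : Int × Int)
    (adj : PySem.Dict (Int × Int) (PySem.Set (Int × Int))) (q : Int × Int) :
    (knightStep n adj dl).getD q PySem.Set.empty
      = if q.1 ∈ PySem.List.pyRange (max 0 (-dl.1)) (min n (n - dl.1)) 1 ∧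
           q.2 ∈ PySem.List.pyRange (max 0 (-dl.2)) (min n (n - dl.2)) 1
        then PySem.Set.add (adj.getD q PySem.Set.empty) (q.1 + dl.1, q.2 + dl.2)
        else adj.getD q PySem.Set.empty := by
  have h := nested_modify_getD (PySem.Set.empty : PySem.Set (Int × Int))
    (fun r c s => PySem.Set.add s (r + dl.1, c + dl.2))
    (PySem.List.pyRange (max 0 (-dl.2)) (min n (n - dl.2)) 1)
    (PySem.List.pyRange (max 0 (-dl.1)) (min n (n - dl.1)) 1)
    adj q (PySem.List.nodup_pyRange_one _ _) (PySem.List.nodup_pyRange_one _ _)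
  exact h

lemma knightStep_keys (n : Int) (dl : Int × Int)
    (adj : PySem.Dict (Int × Int) (PySem.Set (Int × Int)))
    (h : adj.keys = pvCells n) : (knightStep n adj dl).keys = pvCells n := by
  have hk := nested_modify_keys (PySem.Set.empty : PySem.Set (Int × Int))
    (fun r c s => PySem.Set.add s (r + dl.1, c + dl.2))
    (PySem.List.pyRange (max 0 (-dl.2)) (min n (n - dl.2)) 1)
    (PySem.List.pyRange (max 0 (-dl.1)) (min n (n - dl.1)) 1)
    adj (by
      intro r hr c hc
      rw [h]
      rw [PySem.List.mem_pyRange_one] at hr hc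
      exact mem_pvCells.mpr (by constructor <;> omega))
  exact hk.trans h

lemma foldSteps_getD (n : Int) :
    ∀ (ds : List (Int × Int)) (adj : PySem.Dict (Int × Int) (PySem.Set (Int × Int))) (q : Int × Int),
      (ds.map (fun dl => (q.1 + dl.1, q.2 + dl.2))).Nodup →
      (∀ dl ∈ ds, (q.1 + dl.1, q.2 + dl.2) ∉ adj.getD q PySem.Set.empty) →
      (ds.foldl (knightStep n) adj).getD q PySem.Set.empty
        = adj.getD q PySem.Set.empty ++
          (ds.filter (fun dl =>
            decide (q.1 ∈ PySem.List.pyRange (max 0 (-dl.1)) (min n (n - dl.1)) 1 ∧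
                    q.2 ∈ PySem.List.pyRange (max 0 (-dl.2)) (min n (n - dl.2)) 1))).map
            (fun dl => (q.1 + dl.1, q.2 + dl.2)) := by
  intro ds
  induction ds with
  | nil => intro adj q _ _; simp
  | cons dl t ih =>
    intro adj q hnd hfresh
    have hnd2 : ((q.1 + dl.1, q.2 + dl.2) ∉ t.map (fun dl => (q.1 + dl.1, q.2 + dl.2))) ∧
        (t.map (fun dl => (q.1 + dl.1, q.2 + dl.2))).Nodup :=
      List.nodup_cons.mp (by simpa using hnd)
    simp only [List.foldl_cons, List.filter_cons]
    have hstep := knightStep_getD n dl adj q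
    by_cases hcond : q.1 ∈ PySem.List.pyRange (max 0 (-dl.1)) (min n (n - dl.1)) 1 ∧
        q.2 ∈ PySem.List.pyRange (max 0 (-dl.2)) (min n (n - dl.2)) 1
    · rw [if_pos hcond] at hstep
      have hadd : PySem.Set.add (adj.getD q PySem.Set.empty) (q.1 + dl.1, q.2 + dl.2)
          = adj.getD q PySem.Set.empty ++ [(q.1 + dl.1, q.2 + dl.2)] :=
        PySem.Set.add_of_not_mem (hfresh dl (by simp))
      have hfresh' : ∀ dl' ∈ t, (q.1 + dl'.1, q.2 + dl'.2) ∉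
          (knightStep n adj dl).getD q PySem.Set.empty := by
        intro dl' hdl'
        rw [hstep, hadd]
        simp only [List.mem_append, List.mem_singleton, not_or]
        refine ⟨hfresh dl' (by simp [hdl']), fun hEq => ?_⟩
        exact hnd2.1 (hEq ▸ List.mem_map_of_mem hdl')
      rw [ih _ _ hnd2.2 hfresh', hstep, hadd]
      have hdec : decide (q.1 ∈ PySem.List.pyRange (max 0 (-dl.1)) (min n (n - dl.1)) 1 ∧
          q.2 ∈ PySem.List.pyRange (max 0 (-dl.2)) (min n (n - dl.2)) 1) = true := by
        simpa using hcond
      rw [hdec, if_pos rfl]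
      simp [List.append_assoc]
    · rw [if_neg hcond] at hstep
      have hfresh' : ∀ dl' ∈ t, (q.1 + dl'.1, q.2 + dl'.2) ∉
          (knightStep n adj dl).getD q PySem.Set.empty := by
        intro dl' hdl'; rw [hstep]; exact hfresh dl' (by simp [hdl'])
      rw [ih _ _ hnd2.2 hfresh', hstep]
      have hdec : decide (q.1 ∈ PySem.List.pyRange (max 0 (-dl.1)) (min n (n - dl.1)) 1 ∧
          q.2 ∈ PySem.List.pyRange (max 0 (-dl.2)) (min n (n - dl.2)) 1) = false := by
        simpa using hcond
      rw [hdec]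
      simp

lemma foldSteps_keys (n : Int) :
    ∀ (ds : List (Int × Int)) (adj : PySem.Dict (Int × Int) (PySem.Set (Int × Int))),
      adj.keys = pvCells n → (ds.foldl (knightStep n) adj).keys = pvCells n := by
  intro ds
  induction ds with
  | nil => intro adj h; exact h
  | cons dl t ih =>
    intro adj h
    exact ih _ (knightStep_keys n dl adj h)

def pvAVal (n r c : Int) : PySem.Set (Int × Int) :=
  PySem.Set.ofList ((kDeltas.filter (fun d =>
    decide (0 ≤ r + d.1 ∧ r + d.1 < n ∧ 0 ≤ c + d.2 ∧ c + d.2 < n))).map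
      (fun d => (r + d.1, c + d.2)))

def pvADict (n : Int) : PySem.Dict (Int × Int) (PySem.Set (Int × Int)) :=
  (PySem.List.pyRange 0 n 1).foldl (fun adj r =>
    (PySem.List.pyRange 0 n 1).foldl (fun adj c =>
      adj.insert (r, c) (pvAVal n r c)) adj) PySem.Dict.empty

def pvSeed (n : Int) : PySem.Dict (Int × Int) (PySem.Set (Int × Int)) :=
  (PySem.List.pyRange 0 n 1).foldl (fun adj r =>
    (PySem.List.pyRange 0 n 1).foldl (fun adj c =>
      adj.insert (r, c) PySem.Set.empty) adj) PySem.Dict.empty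

def pvBDict (n : Int) : PySem.Dict (Int × Int) (PySem.Set (Int × Int)) :=
  kDeltas.foldl (knightStep n) (pvSeed n)

lemma pvADict_items (n : Int) :
    (pvADict n).items = (pvCells n).map (fun rc => (rc, pvAVal n rc.1 rc.2)) := by
  have h := nested_insert_items (PySem.List.pyRange 0 n 1) (pvAVal n)
    (PySem.List.pyRange 0 n 1) PySem.Dict.empty
    (PySem.List.nodup_pyRange_one _ _) (PySem.List.nodup_pyRange_one _ _)
    (by simp [PySem.Dict.keys_empty])
  rw [show pvADict n = (PySem.List.pyRange 0 n 1).foldl (fun adj r =>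
      (PySem.List.pyRange 0 n 1).foldl (fun adj c =>
        adj.insert (r, c) (pvAVal n r c)) adj) PySem.Dict.empty from rfl, h]
  simp [pvCells, List.map_flatMap, List.map_map, Function.comp_def, PySem.Dict.empty]

lemma pvSeed_items (n : Int) :
    (pvSeed n).items = (pvCells n).map (fun rc => (rc, (PySem.Set.empty : PySem.Set (Int × Int)))) := by
  have h := nested_insert_items (PySem.List.pyRange 0 n 1)
    (fun _ _ => (PySem.Set.empty : PySem.Set (Int × Int)))
    (PySem.List.pyRange 0 n 1) PySem.Dict.empty
    (PySem.List.nodup_pyRange_one _ _) (PySem.List.nodup_pyRange_one _ _)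
    (by simp [PySem.Dict.keys_empty])
  rw [show pvSeed n = (PySem.List.pyRange 0 n 1).foldl (fun adj r =>
      (PySem.List.pyRange 0 n 1).foldl (fun adj c =>
        adj.insert (r, c) PySem.Set.empty) adj) PySem.Dict.empty from rfl, h]
  simp [pvCells, List.map_flatMap, List.map_map, Function.comp_def, PySem.Dict.empty]

lemma pvSeed_keys (n : Int) : (pvSeed n).keys = pvCells n := by
  simp only [PySem.Dict.keys, pvSeed_items, List.map_map]
  simp [Function.comp_def]

lemma pvBDict_keys (n : Int) : (pvBDict n).keys = pvCells n :=
  foldSteps_keys n kDeltas (pvSeed n) (pvSeed_keys n)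

lemma pvSeed_getD (n : Int) (q : Int × Int) (hq : q ∈ pvCells n) :
    (pvSeed n).getD q PySem.Set.empty = PySem.Set.empty := by
  have hmem : (q, (PySem.Set.empty : PySem.Set (Int × Int))) ∈ (pvSeed n).items := by
    rw [pvSeed_items]; exact List.mem_map_of_mem hq
  have hnd : (pvSeed n).keys.Nodup := by rw [pvSeed_keys]; exact pvCells_nodup n
  exact PySem.Dict.getD_of_mem_items (pvSeed n) hmem hnd PySem.Set.empty

lemma pvBDict_getD (n : Int) (q : Int × Int) (hq : q ∈ pvCells n) :
    (pvBDict n).getD q PySem.Set.empty = pvAVal n q.1 q.2 := by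
  obtain ⟨a, b⟩ := q
  obtain ⟨⟨ha0, han⟩, hb0, hbn⟩ := mem_pvCells.mp hq
  have h := foldSteps_getD n kDeltas (pvSeed n) (a, b)
    (targets_nodup a b)
    (by intro dl _; rw [pvSeed_getD n _ hq]; simp [PySem.Set.empty])
  rw [show pvBDict n = kDeltas.foldl (knightStep n) (pvSeed n) from rfl, h,
    pvSeed_getD n _ hq]
  have hfc : kDeltas.filter (fun dl =>
      decide ((a, b).1 ∈ PySem.List.pyRange (max 0 (-dl.1)) (min n (n - dl.1)) 1 ∧
              (a, b).2 ∈ PySem.List.pyRange (max 0 (-dl.2)) (min n (n - dl.2)) 1))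
      = kDeltas.filter (fun d =>
      decide (0 ≤ (a, b).1 + d.1 ∧ (a, b).1 + d.1 < n ∧ 0 ≤ (a, b).2 + d.2 ∧ (a, b).2 + d.2 < n)) := by
    refine List.filter_congr ?_
    intro dl _
    simp only [PySem.List.mem_pyRange_one]
    rw [decide_eq_decide]
    omega
  rw [hfc]
  have hnodup : ((kDeltas.filter (fun d =>
      decide (0 ≤ (a, b).1 + d.1 ∧ (a, b).1 + d.1 < n ∧ 0 ≤ (a, b).2 + d.2 ∧ (a, b).2 + d.2 < n))).map
      (fun dl => ((a, b).1 + dl.1, (a, b).2 + dl.2))).Nodup :=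
    (targets_nodup a b).sublist (List.Sublist.map _ List.filter_sublist)
  rw [show pvAVal n (a, b).1 (a, b).2 = PySem.Set.ofList ((kDeltas.filter (fun d =>
      decide (0 ≤ (a, b).1 + d.1 ∧ (a, b).1 + d.1 < n ∧ 0 ≤ (a, b).2 + d.2 ∧ (a, b).2 + d.2 < n))).map
      (fun d => ((a, b).1 + d.1, (a, b).2 + d.2))) from rfl,
    PySem.Set.ofList_eq_self_of_nodup _ hnodup]
  simp [PySem.Set.empty]

-- ===== VERDICT (by name: the statement is the Claim_ definition above) =====
theorem build_knight_adjacency_spec : Claim_equal_build_knight_adjacency := by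
  intro n _
  show build_knight_adjacency n = build_knight_adjacency_alt n
  have hA : build_knight_adjacency n
      = (pvADict n).items.map (fun p => (p.1.1, p.1.2, p.2)) := rfl
  have hB : build_knight_adjacency_alt n
      = (pvBDict n).items.map (fun p => (p.1.1, p.1.2, p.2)) := rfl
  have hBitems : (pvBDict n).items
      = (pvCells n).map (fun q => (q, (pvBDict n).getD q PySem.Set.empty)) := by
    rw [PySem.Dict.items_eq_map_keys (pvBDict n)
      (by rw [pvBDict_keys]; exact pvCells_nodup n) PySem.Set.empty, pvBDict_keys]
  rw [hA, hB, pvADict_items, hBitems, List.map_map, List.map_map]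
  refine List.map_congr_left ?_
  intro q hq
  simp only [Function.comp_apply]
  rw [pvBDict_getD n q hq]
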